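-- pv_equiv track=rewrite | github.com/oscarlopezbello/PROYECTO_TFM_UNIR | src/tfm_match/embeddings/index_language.py | canonical_language_doc
-- ===== SOURCE A (Python) =====
-- from typing import List, Dict, Any, Optional, Tuple
--
-- def canonical_language_doc(lang_items: List[Dict[str, Any]]) -> str:
--     """
--     Documento canónico para embedding.
--     Ej: "english: B2; spanish: native"
--     """
--     if not lang_items:
--         return ""
--
--     order = ["english", "spanish", "portuguese", "french", "german", "italian"]
--     lang_items_sorted = sorted(
--         lang_items,
--         key=lambda x: order.index(x["language"]) if x["language"] in order else 999
--     )
--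
--     parts = []
--     for it in lang_items_sorted:
--         parts.append(f"{it['language']}: {it['level']}")
--     return "; ".join(parts)
-- ===== SOURCE B (Python) =====
-- from typing import List, Dict, Any
--
-- def canonical_language_doc(lang_items: List[Dict[str, Any]]) -> str:
--     """Same canonical doc, without sorting: one bucket pass per priority
--     language, then one pass for unknown languages (input order preserved)."""
--     if not lang_items:
--         return ""
--
--     order = ["english", "spanish", "portuguese", "french", "german", "italian"]
--     parts = []
--     for lang in order:
--         for it in lang_items:
--             if it["language"] == lang:
--                 parts.append(f"{it['language']}: {it['level']}")
--     for it in lang_items: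
--         if it["language"] not in order:
--             parts.append(f"{it['language']}: {it['level']}")
--     return "; ".join(parts)
-- ===== Notes on version B (the rewrite author's own statement) =====
-- stated objective: alternative
-- what changed: Replaces the key-based sort with bucket passes: one scan per fixed priority language collecting its items in input order, then one scan collecting unknown-language items, exploiting stability of sorted over the tiny fixed key range.
import Mathlib
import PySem

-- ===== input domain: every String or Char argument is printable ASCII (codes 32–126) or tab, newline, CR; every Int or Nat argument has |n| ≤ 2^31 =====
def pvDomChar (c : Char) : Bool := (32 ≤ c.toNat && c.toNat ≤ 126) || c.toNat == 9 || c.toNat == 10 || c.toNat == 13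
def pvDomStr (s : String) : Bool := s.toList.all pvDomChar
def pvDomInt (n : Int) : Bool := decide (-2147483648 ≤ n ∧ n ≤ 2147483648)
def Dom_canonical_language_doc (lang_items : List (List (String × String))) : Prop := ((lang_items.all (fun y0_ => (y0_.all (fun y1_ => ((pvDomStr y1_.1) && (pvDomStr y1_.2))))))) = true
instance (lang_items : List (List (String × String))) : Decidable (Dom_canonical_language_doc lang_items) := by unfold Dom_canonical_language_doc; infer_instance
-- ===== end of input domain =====

-- B replaces the sort by per-language bucket passes; equivalence of the return values is proved on
-- inputs whose items all carry the 'language' and 'level' keys (elsewhere both Pythons raise KeyError).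

-- shared helpers (both Pythons read the same keys and format the same f-string)
def pvOrder : List String := ["english", "spanish", "portuguese", "french", "german", "italian"]
def pvLang (it : List (String × String)) : String := (PySem.Dict.get? (PySem.Dict.mk it) "language").getD ""
def pvLevel (it : List (String × String)) : String := (PySem.Dict.get? (PySem.Dict.mk it) "level").getD ""
def pvFmt (it : List (String × String)) : String := pvLang it ++ ": " ++ pvLevel it

-- ===== PORT A =====
-- sort key: order.index(x["language"]) if x["language"] in order else 999
def pvKey (it : List (String × String)) : Nat :=
  if pvLang it ∈ pvOrder then (PySem.List.index? pvOrder (pvLang it)).getD 999 else 999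

def canonical_language_doc (lang_items : List (List (String × String))) : String :=
  if lang_items = [] then ""
  else
    let lang_items_sorted := PySem.List.sorted lang_items pvKey
    let parts := lang_items_sorted.foldl (fun acc it => acc ++ [pvFmt it]) []
    PySem.Str.join "; " parts

-- ===== PORT B =====
def canonical_language_doc_alt (lang_items : List (List (String × String))) : String :=
  if lang_items = [] then ""
  else
    let parts := pvOrder.foldl
      (fun acc lang =>
        lang_items.foldl (fun acc2 it => if pvLang it == lang then acc2 ++ [pvFmt it] else acc2) acc) []
    let parts2 := lang_items.foldl
      (fun acc it => if pvLang it ∉ pvOrder then acc ++ [pvFmt it] else acc) parts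
    PySem.Str.join "; " parts2

-- ===== PRECONDITION & SPEC =====
-- Pre_ excludes exactly the inputs on which the Python A raises KeyError: an item missing
-- the 'language' or the 'level' key.
def Pre_canonical_language_doc (lang_items : List (List (String × String))) : Prop :=
  ∀ it ∈ lang_items, (PySem.Dict.get? (PySem.Dict.mk it) "language").isSome ∧ (PySem.Dict.get? (PySem.Dict.mk it) "level").isSome
instance (lang_items : List (List (String × String))) : Decidable (Pre_canonical_language_doc lang_items) := by unfold Pre_canonical_language_doc; infer_instance

def pvWitness_canonical_language_doc : (List (List (String × String))) :=
  [[("language", "spanish"), ("level", "native")], [("language", "english"), ("level", "B2")]]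

def Spec_canonical_language_doc (lang_items : List (List (String × String))) (out : String) : Prop := out = canonical_language_doc_alt lang_items
instance (lang_items : List (List (String × String))) (out : String) : Decidable (Spec_canonical_language_doc lang_items out) := by unfold Spec_canonical_language_doc; infer_instance

-- ===== CLAIM (what is proved, stated in full; the proofs are below) =====
def Claim_equal_canonical_language_doc : Prop := ∀ (lang_items : List (List (String × String))), Dom_canonical_language_doc lang_items → Pre_canonical_language_doc lang_items → Spec_canonical_language_doc lang_items (canonical_language_doc lang_items)

-- ===== LEMMAS AND PROOFS =====

lemma pvKey_lang {it : List (String × String)} {l : String} (h : pvLang it = l) :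
    pvKey it = (if l ∈ pvOrder then (PySem.List.index? pvOrder l).getD 999 else 999) := by
  rw [pvKey, h]

lemma pvKey_notmem {it : List (String × String)} (h : pvLang it ∉ pvOrder) : pvKey it = 999 := by
  simp [pvKey, h]

lemma pvKey_mem_vs (it : List (String × String)) : pvKey it ∈ ([0, 1, 2, 3, 4, 5, 999] : List Nat) := by
  by_cases h : pvLang it ∈ pvOrder
  · have h' := h
    simp only [pvOrder, List.mem_cons, List.not_mem_nil, or_false] at h'
    rcases h' with h1 | h1 | h1 | h1 | h1 | h1 <;> rw [pvKey_lang h1] <;> decide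
  · rw [pvKey_notmem h]; decide

-- insertBy walks past a prefix it is not before and stops at a suffix it is before
lemma insertBy_mid {α : Type} (before : α → α → Bool) (x : α) (p s : List α)
    (hp : ∀ y ∈ p, before x y = false) (hs : ∀ y ∈ s, before x y = true) :
    PySem.List.insertBy before x (p ++ s) = p ++ x :: s := by
  induction p with
  | nil =>
    cases s with
    | nil => rfl
    | cons z zs => simp [PySem.List.insertBy, hs z (by simp)]
  | cons a p ih =>
    simp only [List.cons_append, PySem.List.insertBy, hp a (by simp), Bool.false_eq_true,
      if_false]
    rw [ih (fun y hy => hp y (by simp [hy]))]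

-- stable sort over a key with finitely many, strictly increasing values is the bucket concatenation
lemma sorted_eq_buckets {α : Type} (key : α → Nat) (vs : List Nat) (hvs : vs.Pairwise (· < ·))
    (xs : List α) (hcov : ∀ x ∈ xs, key x ∈ vs) :
    PySem.List.sorted xs key = (vs.map (fun v => xs.filter (fun x => key x == v))).flatten := by
  rw [PySem.List.sorted_eq_foldl_insertBy]
  suffices H : ∀ (ys l0 : List α), (∀ x ∈ ys, key x ∈ vs) →
      ys.foldl (fun acc x => PySem.List.insertBy (fun a b => decide (key a < key b)) x acc)
        ((vs.map (fun v => l0.filter (fun x => key x == v))).flatten)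
      = (vs.map (fun v => (l0 ++ ys).filter (fun x => key x == v))).flatten by
    have := H xs [] hcov
    simpa using this
  intro ys
  induction ys with
  | nil => intro l0 _; simp
  | cons x t ih =>
    intro l0 hc
    have hx : key x ∈ vs := hc x (by simp)
    have hstep : PySem.List.insertBy (fun a b => decide (key a < key b)) x
        ((vs.map (fun v => l0.filter (fun x => key x == v))).flatten)
        = (vs.map (fun v => (l0 ++ [x]).filter (fun x => key x == v))).flatten := by
      obtain ⟨s, t', hst⟩ := List.append_of_mem hx
      subst hst
      rw [List.pairwise_append] at hvs
      obtain ⟨hs_pw, ht_pw, hcross⟩ := hvs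
      have hlt_s : ∀ v ∈ s, v < key x := fun v hv => hcross v hv (key x) (by simp)
      have hlt_t : ∀ v ∈ t', key x < v := by
        have := List.pairwise_cons.mp ht_pw
        exact this.1
      have hp : ∀ y ∈ (s.map (fun v => l0.filter (fun x => key x == v))).flatten
          ++ l0.filter (fun y => key y == key x),
          (fun a b => decide (key a < key b)) x y = false := by
        intro y hy
        simp only [List.mem_append, List.mem_flatten, List.mem_map] at hy
        have hkey : key y ≤ key x := by
          rcases hy with ⟨L, ⟨v, hv, rfl⟩, hyL⟩ | hyf
          · have := (List.mem_filter.mp hyL).2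
            have hvy : key y = v := by simpa using this
            exact le_of_lt (hvy ▸ hlt_s v hv)
          · have := (List.mem_filter.mp hyf).2
            have : key y = key x := by simpa using this
            exact this.le
        simp [Nat.not_lt.mpr hkey]
      have hs2 : ∀ y ∈ (t'.map (fun v => l0.filter (fun x => key x == v))).flatten,
          (fun a b => decide (key a < key b)) x y = true := by
        intro y hy
        simp only [List.mem_flatten, List.mem_map] at hy
        obtain ⟨L, ⟨v, hv, rfl⟩, hyL⟩ := hy
        have := (List.mem_filter.mp hyL).2
        have hvy : key y = v := by simpa using this
        simp [hvy ▸ hlt_t v hv]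
      have hmid := insertBy_mid (fun a b => decide (key a < key b)) x
        ((s.map (fun v => l0.filter (fun x => key x == v))).flatten ++ l0.filter (fun y => key y == key x))
        ((t'.map (fun v => l0.filter (fun x => key x == v))).flatten) hp hs2
      simp only [List.map_append, List.map_cons, List.flatten_append, List.flatten_cons]
      rw [← List.append_assoc, List.append_assoc _ (l0.filter (fun y => key y == key x)), ← List.append_assoc, hmid]
      · -- rewrite the appended-[x] buckets
        have hfs : ∀ v ∈ s, (l0 ++ [x]).filter (fun y => key y == v) = l0.filter (fun y => key y == v) := by
          intro v hv
          rw [List.filter_append]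
          have : key x ≠ v := Nat.ne_of_gt (hlt_s v hv)
          simp [this]
        have hft : ∀ v ∈ t', (l0 ++ [x]).filter (fun y => key y == v) = l0.filter (fun y => key y == v) := by
          intro v hv
          rw [List.filter_append]
          have : key x ≠ v := Nat.ne_of_lt (hlt_t v hv)
          simp [this]
        rw [List.map_congr_left hfs, List.map_congr_left hft]
        rw [List.filter_append]
        simp
    rw [List.foldl_cons, hstep, ih (l0 ++ [x]) (fun y hy => hc y (by simp [hy]))]
    simp

-- the seven buckets, named by language instead of by key value
lemma beq_key_eq_lang (xs : List (List (String × String))) (v : Nat) (l : String)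
    (hl : l ∈ pvOrder) (hv : (PySem.List.index? pvOrder l).getD 999 = v) :
    xs.filter (fun it => pvKey it == v) = xs.filter (fun it => pvLang it == l) := by
  apply List.filter_congr
  intro it _
  by_cases h : pvLang it ∈ pvOrder
  · have h' := h
    simp only [pvOrder, List.mem_cons, List.not_mem_nil, or_false] at h'
    have hl' := hl
    simp only [pvOrder, List.mem_cons, List.not_mem_nil, or_false] at hl'
    rcases h' with h1 | h1 | h1 | h1 | h1 | h1 <;> rw [pvKey_lang h1, h1] <;>
      rcases hl' with rfl | rfl | rfl | rfl | rfl | rfl <;> rw [← hv] <;> decide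
  · have hne : pvLang it ≠ l := fun e => h (e ▸ hl)
    rw [pvKey_notmem h]
    have : v ≤ 5 := by
      have hl' := hl
      simp only [pvOrder, List.mem_cons, List.not_mem_nil, or_false] at hl'
      rcases hl' with rfl | rfl | rfl | rfl | rfl | rfl <;> rw [← hv] <;> decide
    have h999 : (999 == v) = false := by
      simp only [beq_eq_false_iff_ne]; omega
    simp [h999, hne]

lemma beq_key_999 (xs : List (List (String × String))) :
    xs.filter (fun it => pvKey it == 999) = xs.filter (fun it => decide (pvLang it ∉ pvOrder)) := by
  apply List.filter_congr
  intro it _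
  by_cases h : pvLang it ∈ pvOrder
  · have h' := h
    simp only [pvOrder, List.mem_cons, List.not_mem_nil, or_false] at h'
    rcases h' with h1 | h1 | h1 | h1 | h1 | h1 <;> rw [pvKey_lang h1] <;> simp [h1, pvOrder] <;> decide
  · rw [pvKey_notmem h]; simp [h]

lemma sorted_pvKey_eq (xs : List (List (String × String))) :
    PySem.List.sorted xs pvKey =
      xs.filter (fun it => pvLang it == "english") ++ xs.filter (fun it => pvLang it == "spanish") ++
      xs.filter (fun it => pvLang it == "portuguese") ++ xs.filter (fun it => pvLang it == "french") ++
      xs.filter (fun it => pvLang it == "german") ++ xs.filter (fun it => pvLang it == "italian") ++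
      xs.filter (fun it => decide (pvLang it ∉ pvOrder)) := by
  rw [sorted_eq_buckets pvKey [0, 1, 2, 3, 4, 5, 999] (by decide) xs (fun x _ => pvKey_mem_vs x)]
  simp only [List.map_cons, List.map_nil, List.flatten_cons, List.flatten_nil, List.append_nil]
  rw [beq_key_eq_lang xs 0 "english" (by decide) (by decide),
      beq_key_eq_lang xs 1 "spanish" (by decide) (by decide),
      beq_key_eq_lang xs 2 "portuguese" (by decide) (by decide),
      beq_key_eq_lang xs 3 "french" (by decide) (by decide),
      beq_key_eq_lang xs 4 "german" (by decide) (by decide),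
      beq_key_eq_lang xs 5 "italian" (by decide) (by decide),
      beq_key_999 xs]
  simp [List.append_assoc]

-- ===== VERDICT (by name: the statement is the Claim_ definition above) =====
theorem canonical_language_doc_spec : Claim_equal_canonical_language_doc := by
  intro xs _ _
  unfold Spec_canonical_language_doc canonical_language_doc canonical_language_doc_alt
  by_cases hnil : xs = []
  · simp [hnil]
  · simp only [hnil, if_false]
    congr 1
    rw [PySem.List.foldl_append_singleton_eq_map, sorted_pvKey_eq]
    have hinner : ∀ (acc : List String) (lang : String),
        xs.foldl (fun acc2 it => if pvLang it == lang then acc2 ++ [pvFmt it] else acc2) acc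
          = acc ++ (xs.filter (fun it => pvLang it == lang)).map pvFmt := by
      intro acc lang
      exact PySem.List.foldl_append_if (fun it => pvLang it == lang) pvFmt xs acc
    have houter :
        pvOrder.foldl (fun acc lang =>
          xs.foldl (fun acc2 it => if pvLang it == lang then acc2 ++ [pvFmt it] else acc2) acc) []
          = (xs.filter (fun it => pvLang it == "english")).map pvFmt ++
            (xs.filter (fun it => pvLang it == "spanish")).map pvFmt ++
            (xs.filter (fun it => pvLang it == "portuguese")).map pvFmt ++
            (xs.filter (fun it => pvLang it == "french")).map pvFmt ++
            (xs.filter (fun it => pvLang it == "german")).map pvFmt ++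
            (xs.filter (fun it => pvLang it == "italian")).map pvFmt := by
      simp only [pvOrder, List.foldl_cons, List.foldl_nil, hinner]
      simp [List.append_assoc]
    rw [PySem.List.foldl_append_ite (fun it => pvLang it ∉ pvOrder) pvFmt xs _, houter]
    simp [List.map_append, List.append_assoc]
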